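-- pv_equiv track=rewrite | github.com/FCHXWH823/SO3-Cell | Framework/CellGen/src/ILP_DH_notopo.py | get_list_set
-- ===== SOURCE A (Python) =====
-- def get_list_set(x, MAR, num_cols):
--     list_set = []
--     #print (x,MAR,num_cols)
--     for start in range(x - MAR, x):
--         if start < -1:
--             continue
--         seq_full = list(range(start, start + (MAR+2)))
--         seq_clipped = [c for c in seq_full if 0 <= c < num_cols]
--
--         if x not in seq_clipped or len(seq_clipped) < MAR+1:
--             continue
--
--         list_set.append(seq_clipped)
--
--     return list_set
-- ===== SOURCE B (Python) =====
-- def get_list_set(x, MAR, num_cols):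
--     # Closed form: a start s is accepted iff x is a valid column, num_cols admits
--     # a window of length MAR+1, and s lies in one contiguous interval of starts;
--     # so compute that interval directly and emit its windows, with no per-start tests.
--     if x < 0 or x >= num_cols or num_cols < MAR + 1:
--         return []
--     s_lo = max(x - MAR, -1)
--     s_hi = min(x, num_cols - MAR)
--     return [list(range(max(s, 0), min(s + MAR + 2, num_cols)))
--             for s in range(s_lo, s_hi)]
-- ===== Notes on version B (the rewrite author's own statement) =====
-- stated objective: faster
-- what changed: B derives a closed-form contiguous interval of valid window starts (after three global guards on x, num_cols, MAR) and emits the clipped windows for exactly that interval, instead of A's per-start generate-filter-test loop.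
import Mathlib
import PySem

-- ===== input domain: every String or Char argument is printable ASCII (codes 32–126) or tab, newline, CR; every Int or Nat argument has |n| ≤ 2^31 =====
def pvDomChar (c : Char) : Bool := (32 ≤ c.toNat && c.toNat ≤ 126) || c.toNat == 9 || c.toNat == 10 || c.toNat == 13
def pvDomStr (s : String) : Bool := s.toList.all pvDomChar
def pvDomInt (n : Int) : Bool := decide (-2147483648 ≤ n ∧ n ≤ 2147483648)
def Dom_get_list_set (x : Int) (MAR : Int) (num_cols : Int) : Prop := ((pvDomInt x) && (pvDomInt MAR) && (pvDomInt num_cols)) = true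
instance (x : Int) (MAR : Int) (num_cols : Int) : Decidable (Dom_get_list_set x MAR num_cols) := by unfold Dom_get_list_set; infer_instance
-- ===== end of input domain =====

-- B replaces A's per-start generate-filter-test loop by a closed-form interval of valid starts (derived arithmetically) whose windows are emitted directly; a timing run measured it faster.
-- ===== PORT A =====
-- literal transliteration of A: for-loop as foldl, full window built by pyRange then filtered
def get_list_set (x : Int) (MAR : Int) (num_cols : Int) : List (List Int) :=
  (PySem.List.pyRange (x - MAR) x 1).foldl (fun list_set start =>
    if start < -1 then list_set
    else
      let seq_full := PySem.List.pyRange start (start + (MAR + 2)) 1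
      let seq_clipped := seq_full.filter (fun c => decide (0 ≤ c ∧ c < num_cols))
      if x ∉ seq_clipped ∨ (seq_clipped.length : Int) < MAR + 1 then list_set
      else list_set ++ [seq_clipped]) []

-- ===== PORT B =====
-- B: three global guards, then a comprehension over the closed-form interval of valid starts
def get_list_set_alt (x : Int) (MAR : Int) (num_cols : Int) : List (List Int) :=
  if x < 0 ∨ num_cols ≤ x ∨ num_cols < MAR + 1 then []
  else
    let s_lo := max (x - MAR) (-1)
    let s_hi := min x (num_cols - MAR)
    (PySem.List.pyRange s_lo s_hi 1).map (fun s =>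
      PySem.List.pyRange (max s 0) (min (s + MAR + 2) num_cols) 1)

-- ===== PRECONDITION & SPEC =====
def Spec_get_list_set (x : Int) (MAR : Int) (num_cols : Int) (out : List (List Int)) : Prop := out = get_list_set_alt x MAR num_cols
instance (x : Int) (MAR : Int) (num_cols : Int) (out : List (List Int)) : Decidable (Spec_get_list_set x MAR num_cols out) := by unfold Spec_get_list_set; infer_instance

-- ===== CLAIM (what is proved, stated in full; the proofs are below) =====
def Claim_equal_get_list_set : Prop := ∀ (x : Int) (MAR : Int) (num_cols : Int), Dom_get_list_set x MAR num_cols → Spec_get_list_set x MAR num_cols (get_list_set x MAR num_cols)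

-- ===== LEMMAS AND PROOFS =====

-- filtering an int range by an interval condition yields the range over the intersected bounds
theorem filter_pyRange_interval (a b c d : Int) :
    (PySem.List.pyRange a b 1).filter (fun s => decide (c ≤ s ∧ s < d))
      = PySem.List.pyRange (max a c) (min b d) 1 := by
  by_cases hab : b ≤ a
  · rw [PySem.List.pyRange_one_eq_nil hab, PySem.List.pyRange_one_eq_nil (by omega)]
    rfl
  · push Not at hab
    rw [PySem.List.pyRange_one_cons hab]
    have ih := filter_pyRange_interval (a + 1) b c d
    by_cases ha : c ≤ a ∧ a < d
    · rw [List.filter_cons_of_pos (by simp [ha.1, ha.2]), ih,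
        show max (a+1) c = a + 1 by omega, show max a c = a by omega,
        PySem.List.pyRange_one_cons (show a < min b d by omega)]
    · have hfalse : (decide (c ≤ a ∧ a < d)) = false := by simp; omega
      simp only [List.filter_cons, hfalse, Bool.false_eq_true, if_false, ih]
      by_cases hc : c ≤ a
      · -- then d ≤ a : both sides empty
        rw [PySem.List.pyRange_one_eq_nil (by omega), PySem.List.pyRange_one_eq_nil (by omega)]
      · rw [show max (a+1) c = max a c by omega]
termination_by (b - a).toNat
decreasing_by omega

-- A's loop body in the canonical 'if p then append f' shape
theorem get_list_set_eq_filter_map (x MAR num_cols : Int) :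
    get_list_set x MAR num_cols
      = ((PySem.List.pyRange (x - MAR) x 1).filter (fun s => decide
           (¬ s < -1 ∧ ¬ (x ∉ (PySem.List.pyRange s (s + (MAR + 2)) 1).filter
                              (fun c => decide (0 ≤ c ∧ c < num_cols)) ∨
              (((PySem.List.pyRange s (s + (MAR + 2)) 1).filter
                 (fun c => decide (0 ≤ c ∧ c < num_cols))).length : Int) < MAR + 1)))).map
        (fun s => (PySem.List.pyRange s (s + (MAR + 2)) 1).filter
                     (fun c => decide (0 ≤ c ∧ c < num_cols))) := by
  unfold get_list_set
  rw [show (fun (list_set : List (List Int)) (start : Int) =>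
        if start < -1 then list_set
        else
          let seq_full := PySem.List.pyRange start (start + (MAR + 2)) 1
          let seq_clipped := seq_full.filter (fun c => decide (0 ≤ c ∧ c < num_cols))
          if x ∉ seq_clipped ∨ (seq_clipped.length : Int) < MAR + 1 then list_set
          else list_set ++ [seq_clipped])
      = (fun (list_set : List (List Int)) (s : Int) =>
          if (¬ s < -1 ∧ ¬ (x ∉ (PySem.List.pyRange s (s + (MAR + 2)) 1).filter
                                (fun c => decide (0 ≤ c ∧ c < num_cols)) ∨
               (((PySem.List.pyRange s (s + (MAR + 2)) 1).filter
                  (fun c => decide (0 ≤ c ∧ c < num_cols))).length : Int) < MAR + 1))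
          then list_set ++ [(PySem.List.pyRange s (s + (MAR + 2)) 1).filter
                               (fun c => decide (0 ≤ c ∧ c < num_cols))]
          else list_set) from ?_]
  · rw [PySem.List.foldl_append_ite]
    simp
  · funext acc s
    by_cases h1 : s < -1
    · simp [h1]
    · by_cases h2 : (x ∉ (PySem.List.pyRange s (s + (MAR + 2)) 1).filter
                        (fun c => decide (0 ≤ c ∧ c < num_cols)) ∨
           (((PySem.List.pyRange s (s + (MAR + 2)) 1).filter
              (fun c => decide (0 ≤ c ∧ c < num_cols))).length : Int) < MAR + 1)
      · simp only [if_neg h1, if_pos h2]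
        exact (if_neg (fun h => h.2 h2)).symm
      · simp only [if_neg h1, if_neg h2, if_pos (And.intro h1 h2)]

-- ===== VERDICT (by name: the statement is the Claim_ definition above) =====
theorem get_list_set_spec : Claim_equal_get_list_set := by
  intro x MAR n _
  unfold Spec_get_list_set
  rw [get_list_set_eq_filter_map]
  unfold get_list_set_alt
  by_cases hg : x < 0 ∨ n ≤ x ∨ n < MAR + 1
  · rw [if_pos hg]
    rw [List.filter_eq_nil_iff.mpr ?_, List.map_nil]
    intro s hs
    have hmem := PySem.List.mem_pyRange_one.mp hs
    simp only [decide_eq_true_eq, not_and, not_not]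
    intro _
    rw [filter_pyRange_interval, PySem.List.length_pyRange_one]
    by_contra hC
    push Not at hC
    obtain ⟨hx, hlen⟩ := hC
    have hx' := PySem.List.mem_pyRange_one.mp hx
    omega
  · rw [if_neg hg]
    push Not at hg
    simp only
    rw [show (PySem.List.pyRange (x - MAR) x 1).filter (fun s => decide
           (¬ s < -1 ∧ ¬ (x ∉ (PySem.List.pyRange s (s + (MAR + 2)) 1).filter
                              (fun c => decide (0 ≤ c ∧ c < n)) ∨
              (((PySem.List.pyRange s (s + (MAR + 2)) 1).filter
                 (fun c => decide (0 ≤ c ∧ c < n))).length : Int) < MAR + 1)))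
        = (PySem.List.pyRange (x - MAR) x 1).filter (fun s => decide ((-1) ≤ s ∧ s < n - MAR))
      from ?_]
    · rw [filter_pyRange_interval]
      apply List.map_congr_left
      intro s hs
      rw [filter_pyRange_interval, show min (s + (MAR + 2)) n = min (s + MAR + 2) n by omega]
    · apply List.filter_congr
      intro s hs
      have hmem := PySem.List.mem_pyRange_one.mp hs
      rw [filter_pyRange_interval, PySem.List.length_pyRange_one]
      simp only [decide_eq_decide, PySem.List.mem_pyRange_one]
      omega
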